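-- pv_equiv track=rewrite | github.com/epoyraz/leetcode | solutions/3390.py | minRectanglesToCoverPoints
-- ===== SOURCE A (Python) =====
-- def minRectanglesToCoverPoints(points, w):
--     """
--     :type points: List[List[int]]
--     :type w: int
--     :rtype: int
--     """
--     # extract and sort x-coordinates
--     xs = sorted(x for x, _ in points)
--     n = len(xs)
--     ans = 0
--     i = 0
--
--     while i < n:
--         # place one rectangle covering [xs[i], xs[i] + w]
--         start = xs[i]
--         limit = start + w
--         ans += 1
--         # skip all points covered by this interval
--         while i < n and xs[i] <= limit:
--             i += 1
--
--     return ans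
-- ===== SOURCE B (Python) =====
-- def minRectanglesToCoverPoints(points, w):
--     xs = [x for x, _ in points]
--     ans = 0
--     while xs:
--         limit = min(xs) + w
--         xs = [x for x in xs if x > limit]
--         ans += 1
--     return ans
-- ===== Notes on version B (the rewrite author's own statement) =====
-- stated objective: alternative
-- what changed: Drops the sort entirely: instead of A's sort followed by a two-pointer sweep, B repeatedly takes the minimum of the remaining x-coordinates, counts one rectangle, and filters out every x within w of that minimum (selection-based repeated min+filter instead of sort+sweep).
import Mathlib
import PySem

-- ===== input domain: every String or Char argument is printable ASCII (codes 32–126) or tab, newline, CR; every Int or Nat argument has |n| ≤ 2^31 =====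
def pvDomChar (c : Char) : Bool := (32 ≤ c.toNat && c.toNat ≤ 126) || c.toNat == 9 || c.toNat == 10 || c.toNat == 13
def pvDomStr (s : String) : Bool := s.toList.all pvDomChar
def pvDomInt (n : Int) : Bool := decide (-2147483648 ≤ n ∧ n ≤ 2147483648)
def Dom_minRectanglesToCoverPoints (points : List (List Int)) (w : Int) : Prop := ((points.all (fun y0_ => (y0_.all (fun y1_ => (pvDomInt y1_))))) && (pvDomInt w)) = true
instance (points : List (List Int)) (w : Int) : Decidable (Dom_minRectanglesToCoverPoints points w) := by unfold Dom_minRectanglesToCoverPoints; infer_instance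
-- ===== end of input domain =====

-- B drops A's sort+sweep: it repeatedly takes the minimum remaining x and filters out every x within w of it (objective: alternative).


-- ===== PORT A =====
-- Outer while of A over the sorted xs: place a rectangle at the current x, then the inner
-- while skips every xs[i] ≤ x + w.  Under Pre_ (0 ≤ w) the inner while always skips the
-- current x itself first (x ≤ x + w), so it is rest.dropWhile here; with w < 0 the Python
-- inner while would not advance i and A diverges — such inputs are outside Pre_.
def goA (w : Int) : List Int → Int
  | [] => 0
  | x :: rest => 1 + goA w (rest.dropWhile (fun y => decide (y ≤ x + w)))
termination_by xs => xs.length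
decreasing_by
  have := List.length_dropWhile_le (fun y => decide (y ≤ x + w)) rest
  simp; omega

-- `x for x, _ in points`: under Pre_ every point has exactly two entries, so x = p.headD 0.
def minRectanglesToCoverPoints (points : List (List Int)) (w : Int) : Int :=
  goA w (PySem.List.sorted (points.map (fun p => p.headD 0)) (fun x => x) false)

-- ===== PORT B =====
-- B's while loop: take min of the remaining xs, filter out everything ≤ min + w.
-- Fuel = initial length: with 0 ≤ w each iteration removes at least the minimum itself,
-- so the fuel suffices; with w < 0 the Python loop diverges (outside Pre_).
def goB (w : Int) : Nat → List Int → Int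
  | 0, _ => 0
  | fuel + 1, xs =>
    match PySem.List.min? xs (fun x => x) with
    | none => 0
    | some m => 1 + goB w fuel (xs.filter (fun x => decide (m + w < x)))

def minRectanglesToCoverPoints_alt (points : List (List Int)) (w : Int) : Int :=
  let xs := points.map (fun p => p.headD 0)
  goB w xs.length xs

-- ===== PRECONDITION & SPEC =====
-- Pre_ excludes the inputs on which the Python A does not return: a point whose length is
-- not 2 makes the unpacking `x, _` raise ValueError/TypeError, and with w < 0 and at least
-- one point A's inner while never advances i, so A loops forever.
def Pre_minRectanglesToCoverPoints (points : List (List Int)) (w : Int) : Prop :=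
  (∀ p ∈ points, p.length = 2) ∧ (points = [] ∨ 0 ≤ w)
instance (points : List (List Int)) (w : Int) : Decidable (Pre_minRectanglesToCoverPoints points w) := by unfold Pre_minRectanglesToCoverPoints; infer_instance
def pvWitness_minRectanglesToCoverPoints : List (List Int) × Int := ([[1, 5], [4, 0], [9, 2]], 2)

def Spec_minRectanglesToCoverPoints (points : List (List Int)) (w : Int) (out : Int) : Prop := out = minRectanglesToCoverPoints_alt points w
instance (points : List (List Int)) (w : Int) (out : Int) : Decidable (Spec_minRectanglesToCoverPoints points w out) := by unfold Spec_minRectanglesToCoverPoints; infer_instance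

-- ===== CLAIM (what is proved, stated in full; the proofs are below) =====
def Claim_equal_minRectanglesToCoverPoints : Prop := ∀ (points : List (List Int)) (w : Int), Dom_minRectanglesToCoverPoints points w → Pre_minRectanglesToCoverPoints points w → Spec_minRectanglesToCoverPoints points w (minRectanglesToCoverPoints points w)

-- ===== LEMMAS AND PROOFS =====

-- On an ascending list, dropping the prefix ≤ c is the same as filtering to > c.
lemma dropWhile_le_eq_filter_gt (c : Int) (l : List Int) (h : l.Pairwise (· ≤ ·)) :
    l.dropWhile (fun y => decide (y ≤ c)) = l.filter (fun y => decide (c < y)) := by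
  induction l with
  | nil => rfl
  | cons y t ih =>
    rcases List.pairwise_cons.mp h with ⟨hy, ht⟩
    by_cases hc : y ≤ c
    · simp [List.dropWhile, List.filter, hc, show ¬ (c < y) by omega, ih ht]
    · have hyc : c < y := by omega
      simp only [List.dropWhile, List.filter, hc, hyc, decide_false, decide_true]
      congr 1
      refine (List.filter_eq_self.mpr ?_).symm
      intro z hz; simpa using lt_of_lt_of_le hyc (hy z hz)

-- Main invariant: goB with enough fuel equals goA on the sorted list, for 0 ≤ w.
lemma goB_eq_goA (w : Int) (hw : 0 ≤ w) : ∀ (n : Nat) (xs : List Int) (f : Nat),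
    xs.length ≤ n → xs.length ≤ f →
    goB w f xs = goA w (PySem.List.sorted xs (fun x => x) false) := by
  intro n
  induction n with
  | zero =>
    intro xs f hn _
    have hx : xs = [] := List.eq_nil_of_length_eq_zero (Nat.le_zero.mp hn)
    subst hx
    have hnil : PySem.List.sorted ([] : List Int) (fun x => x) false = [] := by
      simp [PySem.List.sorted]
    cases f <;> simp [goB, hnil, goA, PySem.List.min?]
  | succ n ih =>
    intro xs f hn hf
    match xs, f with
    | [], 0 =>
      have hnil : PySem.List.sorted ([] : List Int) (fun x => x) false = [] := by
        simp [PySem.List.sorted]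
      simp [goB, hnil, goA]
    | [], f + 1 =>
      have hnil : PySem.List.sorted ([] : List Int) (fun x => x) false = [] := by
        simp [PySem.List.sorted]
      simp [goB, hnil, goA, PySem.List.min?]
    | x :: t, 0 => simp at hf
    | x :: t, f + 1 =>
      set xs := x :: t with hxs
      obtain ⟨m, hm⟩ : ∃ m, PySem.List.min? xs (fun x => x) = some m := by
        cases h : PySem.List.min? xs (fun x => x) with
        | none => rw [PySem.List.min?_eq_none_iff] at h; simp [hxs] at h
        | some m => exact ⟨m, rfl⟩
      have hmmem : m ∈ xs := PySem.List.min?_mem hm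
      have hmmin : ∀ y ∈ xs, m ≤ y := by
        intro y hy; simpa using PySem.List.min?_isMin hm y hy
      -- sorted xs is nonempty with head value m
      obtain ⟨m', rest, hs⟩ : ∃ m' rest, PySem.List.sorted xs (fun x => x) false = m' :: rest := by
        cases h : PySem.List.sorted xs (fun x => x) false with
        | nil => rw [PySem.List.sorted_eq_nil_iff] at h; simp [hxs] at h
        | cons a b => exact ⟨a, b, rfl⟩
      have hperm : (PySem.List.sorted xs (fun x => x) false).Perm xs :=
        PySem.List.sorted_perm xs (fun x => x) false
      have hm'mem : m' ∈ xs := hperm.mem_iff.mp (by simp [hs])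
      have hm'le : ∀ y ∈ xs, m' ≤ y := by
        intro y hy
        simpa using PySem.List.key_head_sorted_le xs (fun x => x) hs y hy
      have hmm' : m' = m := le_antisymm (hm'le m hmmem) (hmmin m' hm'mem)
      have hpw : (m' :: rest).Pairwise (fun a b => (a : Int) ≤ b) := by
        have := PySem.List.sorted_pairwise (xs := xs) (key := fun x : Int => x) 
        simpa [hs] using this
      have hrestpw : rest.Pairwise (fun a b => (a : Int) ≤ b) := (List.pairwise_cons.mp hpw).2
      -- the filtered list
      set p : Int → Bool := fun x => decide (m + w < x) with hp
      have hfilter_perm : (rest.filter p).Perm (xs.filter p) := by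
        have h1 : (m' :: rest).filter p = rest.filter p := by
          simp [List.filter, hp, hmm', show ¬ (m + w < m) by omega]
        have := hperm.filter p
        rw [hs] at this; rwa [h1] at this
      have hsorted_filter : PySem.List.sorted (xs.filter p) (fun x => x) false = rest.filter p :=
        PySem.List.sorted_id_eq_of_perm_of_pairwise _ _ hfilter_perm (List.Pairwise.filter p hrestpw)
      have hlenlt : (xs.filter p).length < xs.length := by
        have hmnot : p m = false := by simp [hp]; omega
        have := List.length_filter_lt_length_iff_exists (l := xs) (p := p)
        exact this.mpr ⟨m, hmmem, by simp [hmnot]⟩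
      have hstep : goB w (f + 1) xs = 1 + goB w f (xs.filter p) := by
        simp [goB, hm, hp]
      have hlen_xs : xs.length ≤ n + 1 := by simpa [hxs] using hn
      have hf_xs : xs.length ≤ f + 1 := by simpa [hxs] using hf
      rw [hstep, ih (xs.filter p) f (by omega) (by omega)]
      rw [hsorted_filter, hs, goA]
      congr 1
      rw [dropWhile_le_eq_filter_gt (m' + w) rest hrestpw]
      simp [hp, hmm']

-- ===== VERDICT (by name: the statement is the Claim_ definition above) =====
theorem minRectanglesToCoverPoints_spec : Claim_equal_minRectanglesToCoverPoints := by
  intro points w _ hpre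
  unfold Spec_minRectanglesToCoverPoints minRectanglesToCoverPoints minRectanglesToCoverPoints_alt
  rcases hpre.2 with hnil | hw
  · subst hnil
    have h0 : PySem.List.sorted ([] : List Int) (fun x => x) false = [] := by
      simp [PySem.List.sorted]
    simp [h0, goA, goB]
  · exact (goB_eq_goA w hw (points.map (fun p => p.headD 0)).length _ _ le_rfl le_rfl).symm
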